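-- pv_equiv track=rewrite | github.com/daniel5426/talmudpedia | backend/app/services/text/navigator.py | encode_hebrew_numeral
-- ===== SOURCE A (Python) =====
-- from typing import Any, Dict, List, Optional, Tuple
--
-- def encode_hebrew_numeral(n: int) -> str:
--     """Simple Gematria helper for 1-999."""
--     if n <= 0:
--         return str(n)
--
--     ones = ["", "א", "ב", "ג", "ד", "ה", "ו", "ז", "ח", "ט"]
--     tens = ["", "י", "כ", "ל", "מ", "נ", "ס", "ע", "פ", "צ"]
--     hundreds = ["", "ק", "ר", "ש", "ת"]
--
--     parts: List[str] = []
--     value = n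
--
--     # Handle 400+ by peeling off tavs greedily (e.g., 500 => ת + ק, 900 => תת"ק)
--     while value >= 400:
--         parts.append("ת")
--         value -= 400
--
--     # Remaining hundreds (0-300)
--     h = value // 100
--     if h:
--         parts.append(hundreds[h])
--         value -= h * 100
--
--     # Tens / ones with special cases for 15,16
--     t = value // 10
--     o = value % 10
--     if t == 1 and o in (5, 6):
--         parts.append("טו" if o == 5 else "טז")
--     else:
--         if t:
--             parts.append(tens[t])
--         if o:
--             parts.append(ones[o])
--
--     result = "".join(parts)
--
--     # Add Geresh/Gershayim
--     if len(result) == 1: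
--         result += "'"
--     elif len(result) > 1:
--         result = result[:-1] + '"' + result[-1]
--
--     return result
-- ===== SOURCE B (Python) =====
-- def encode_hebrew_numeral(n: int) -> str:
--     """Simple Gematria helper for 1-999."""
--     if n <= 0:
--         return str(n)
--
--     table = [(300, "ש"), (200, "ר"), (100, "ק"),
--              (90, "צ"), (80, "פ"), (70, "ע"), (60, "ס"), (50, "נ"),
--              (40, "מ"), (30, "ל"), (20, "כ"), (10, "י"),
--              (9, "ט"), (8, "ח"), (7, "ז"), (6, "ו"), (5, "ה"),
--              (4, "ד"), (3, "ג"), (2, "ב"), (1, "א")]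
--
--     # All the 400s at once, then a greedy table walk on the remainder,
--     # pausing only for the 15/16 special spellings.
--     q, value = divmod(n, 400)
--     parts = ["ת" * q]
--     while value > 0:
--         if value == 15:
--             parts.append("טו")
--             value = 0
--         elif value == 16:
--             parts.append("טז")
--             value = 0
--         else:
--             for v, letters in table:
--                 if v <= value:
--                     parts.append(letters)
--                     value -= v
--                     break
--
--     result = "".join(parts)
--
--     # Add Geresh/Gershayim
--     if len(result) == 1:
--         result += "'"
--     elif len(result) > 1:
--         result = result[:-1] + '"' + result[-1]
--
--     return result
-- ===== Notes on version B (the rewrite author's own statement) =====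
-- stated objective: alternative
-- what changed: B replaces A's peel-400s-one-at-a-time loop plus hard-coded hundreds/tens/ones digit arrays by a single divmod(n,400) with string repetition for the tavs and a greedy first-fit walk over one ordered value-to-letters table for the remainder (with the 15/16 spellings checked in the loop).
import Mathlib
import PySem

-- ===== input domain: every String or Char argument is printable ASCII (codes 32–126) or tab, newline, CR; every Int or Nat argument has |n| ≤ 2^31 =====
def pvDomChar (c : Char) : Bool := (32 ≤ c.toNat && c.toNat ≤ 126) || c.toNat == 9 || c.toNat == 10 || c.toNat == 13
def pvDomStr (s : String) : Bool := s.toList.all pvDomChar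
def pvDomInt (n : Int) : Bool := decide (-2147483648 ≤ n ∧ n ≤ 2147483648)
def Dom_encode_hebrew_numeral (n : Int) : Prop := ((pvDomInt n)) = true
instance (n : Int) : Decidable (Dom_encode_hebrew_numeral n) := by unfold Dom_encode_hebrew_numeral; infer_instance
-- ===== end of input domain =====

-- B replaces A's digit-by-digit (hundreds/tens/ones) decomposition by one divmod for the 400s
-- (string repetition instead of A's peel-one-400-per-iteration loop) plus a greedy first-fit
-- walk over a single ordered value→letters table for the remainder.

-- ===== PORT A =====
-- shared tail: the Geresh/Gershayim post-processing, identical lines in both Pythons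
def pvTail (result : String) : String :=
  if PySem.Str.len result = 1 then result ++ "'"
  else if PySem.Str.len result > 1 then
    match PySem.Str.pyGet? result (-1) with          -- result[-1]; in range since len > 1
    | some c => PySem.Str.slice result none (some (-1)) ++ "\"" ++ String.ofList [c]
    | none => result
  else result

-- while value >= 400: parts.append("ת"); value -= 400
def pvWhile400 (value : Int) : List String × Int :=
  if 400 ≤ value then
    let p := pvWhile400 (value - 400)
    ("ת" :: p.1, p.2)
  else ([], value)
termination_by value.toNat
decreasing_by omega

def pvHebOnes : List String := ["", "א", "ב", "ג", "ד", "ה", "ו", "ז", "ח", "ט"]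
def pvHebTens : List String := ["", "י", "כ", "ל", "מ", "נ", "ס", "ע", "פ", "צ"]
def pvHebHundreds : List String := ["", "ק", "ר", "ש", "ת"]

-- the hundreds/tens/ones part of A (list indexings are always in range: 0 ≤ value < 400 here)
def pvRestA (value0 : Int) : List String :=
  let h := PySem.Int.floordiv value0 100
  let (parts, value) :=
    if h ≠ 0 then ([PySem.List.pyGetD pvHebHundreds h ""], value0 - h * 100)
    else ([], value0)
  let t := PySem.Int.floordiv value 10
  let o := PySem.Int.mod value 10
  if t = 1 ∧ (o = 5 ∨ o = 6) then parts ++ [if o = 5 then "טו" else "טז"]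
  else parts ++ (if t ≠ 0 then [PySem.List.pyGetD pvHebTens t ""] else [])
             ++ (if o ≠ 0 then [PySem.List.pyGetD pvHebOnes o ""] else [])

def encode_hebrew_numeral (n : Int) : String :=
  if n ≤ 0 then PySem.Int.toStr n
  else
    let pr := pvWhile400 n
    pvTail (PySem.Str.join "" (pr.1 ++ pvRestA pr.2))

-- ===== PORT B =====
def pvTableB : List (Int × String) :=
  [(300, "ש"), (200, "ר"), (100, "ק"),
   (90, "צ"), (80, "פ"), (70, "ע"), (60, "ס"), (50, "נ"),
   (40, "מ"), (30, "ל"), (20, "כ"), (10, "י"),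
   (9, "ט"), (8, "ח"), (7, "ז"), (6, "ו"), (5, "ה"),
   (4, "ד"), (3, "ג"), (2, "ב"), (1, "א")]

-- the inner `for … break`: first table entry whose value fits
def pvFirstLE (table : List (Int × String)) (value : Int) : Option (Int × String) :=
  match table with
  | [] => none
  | (v, s) :: rest => if v ≤ value then some (v, s) else pvFirstLE rest value

-- the `while value > 0` loop; fuel = value.toNat suffices since value drops by ≥ 1 each pass
def pvLoopB : Nat → Int → List String
  | 0, _ => []
  | fuel + 1, value =>
    if 0 < value then
      if value = 15 then "טו" :: pvLoopB fuel 0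
      else if value = 16 then "טז" :: pvLoopB fuel 0
      else
        match pvFirstLE pvTableB value with
        | some (v, s) => s :: pvLoopB fuel (value - v)
        | none => []
    else []

def encode_hebrew_numeral_alt (n : Int) : String :=
  if n ≤ 0 then PySem.Int.toStr n
  else
    let q := PySem.Int.floordiv n 400
    let value := PySem.Int.mod n 400
    -- "ת" * q  (q ≥ 0 here)
    let parts := String.ofList (List.replicate q.toNat 'ת') :: pvLoopB value.toNat value
    pvTail (PySem.Str.join "" parts)

-- ===== PRECONDITION & SPEC =====
def Spec_encode_hebrew_numeral (n : Int) (out : String) : Prop := out = encode_hebrew_numeral_alt n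
instance (n : Int) (out : String) : Decidable (Spec_encode_hebrew_numeral n out) := by unfold Spec_encode_hebrew_numeral; infer_instance

-- ===== CLAIM (what is proved, stated in full; the proofs are below) =====
def Claim_equal_encode_hebrew_numeral : Prop := ∀ (n : Int), Dom_encode_hebrew_numeral n → Spec_encode_hebrew_numeral n (encode_hebrew_numeral n)

-- ===== LEMMAS AND PROOFS =====

-- ''.join distributes over cons
theorem pvJoinC_cons (p : List Char) (rest : List (List Char)) :
    PySem.Chars.join [] (p :: rest) = p ++ PySem.Chars.join [] rest := by
  cases rest with
  | nil => simp [PySem.Chars.join_singleton, PySem.Chars.join_nil]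
  | cons q r => simp [PySem.Chars.join_cons_cons]

-- the 400-peeling while loop is division by 400
theorem pvWhile400_eq (n : Int) (h0 : 0 ≤ n) :
    pvWhile400 n = (List.replicate (PySem.Int.floordiv n 400).toNat "ת", PySem.Int.mod n 400) := by
  rw [pvWhile400]
  split_ifs with h
  · rw [pvWhile400_eq (n - 400) (by omega)]
    have e1 : PySem.Int.floordiv n 400 = PySem.Int.floordiv (n - 400) 400 + 1 := by
      rw [PySem.Int.floordiv_eq_ediv_of_pos (b := 400) (by norm_num),
          PySem.Int.floordiv_eq_ediv_of_pos (b := 400) (by norm_num)]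
      omega
    have e2 : PySem.Int.mod n 400 = PySem.Int.mod (n - 400) 400 := by
      rw [PySem.Int.mod_eq_emod_of_pos (b := 400) (by norm_num),
          PySem.Int.mod_eq_emod_of_pos (b := 400) (by norm_num)]
      omega
    have e3 : 0 ≤ PySem.Int.floordiv (n - 400) 400 := by
      rw [PySem.Int.floordiv_eq_ediv_of_pos (b := 400) (by norm_num)]
      omega
    rw [e1, e2]
    have e4 : (PySem.Int.floordiv (n - 400) 400 + 1).toNat
        = (PySem.Int.floordiv (n - 400) 400).toNat + 1 := by omega
    rw [e4, List.replicate_succ]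
  · have e1 : PySem.Int.floordiv n 400 = 0 := by
      rw [PySem.Int.floordiv_eq_ediv_of_pos (b := 400) (by norm_num)]; omega
    have e2 : PySem.Int.mod n 400 = n := by
      rw [PySem.Int.mod_eq_emod_of_pos (b := 400) (by norm_num)]; omega
    rw [e1, e2]; rfl
termination_by n.toNat
decreasing_by omega

-- join of a block of k tavs
theorem pvJoin_replicate (k : Nat) (rest : List (List Char)) :
    PySem.Chars.join [] (List.replicate k ['ת'] ++ rest)
      = List.replicate k 'ת' ++ PySem.Chars.join [] rest := by
  induction k with
  | zero => simp
  | succ m ih => simp [List.replicate_succ, pvJoinC_cons, ih]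

-- the two remainder encoders agree on every remainder 0 ≤ r < 400
set_option maxRecDepth 8192 in
set_option maxHeartbeats 1000000 in
theorem pvBase400 : ∀ i : Fin 400,
    PySem.Chars.join [] ((pvRestA (i : Int)).map String.toList)
      = PySem.Chars.join [] ((pvLoopB i.val (i : Int)).map String.toList) := by decide

-- ===== VERDICT (by name: the statement is the Claim_ definition above) =====
theorem encode_hebrew_numeral_spec : Claim_equal_encode_hebrew_numeral := by
  intro n _
  unfold Spec_encode_hebrew_numeral encode_hebrew_numeral encode_hebrew_numeral_alt
  by_cases hn : n ≤ 0
  · simp [hn]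
  · simp only [hn, if_false]
    apply congrArg pvTail
    apply String.toList_inj.mp
    have h0 : (0:Int) ≤ n := by omega
    have hr0 : 0 ≤ PySem.Int.mod n 400 := PySem.Int.mod_nonneg _ (by norm_num)
    have hr1 : PySem.Int.mod n 400 < 400 := PySem.Int.mod_lt _ (by norm_num)
    rw [pvWhile400_eq n h0]
    simp only [PySem.Str.toList_join, List.map_append, List.map_replicate]
    have ht : ("ת" : String).toList = ['ת'] := by decide
    have he : ("" : String).toList = ([] : List Char) := by decide
    rw [ht, he]
    simp only [List.map_cons, String.toList_ofList]
    rw [pvJoin_replicate, pvJoinC_cons]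
    apply congrArg (List.replicate (PySem.Int.floordiv n 400).toNat 'ת' ++ ·)
    have hk : ((PySem.Int.mod n 400).toNat : Int) = PySem.Int.mod n 400 := by omega
    have := pvBase400 ⟨(PySem.Int.mod n 400).toNat, by omega⟩
    simpa only [Fin.val_mk, hk] using this
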